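-- pv_equiv track=rewrite | github.com/Sheel-ui/Analysis-of-Algorithms | Project II/app.py | alg4
-- ===== SOURCE A (Python) =====
-- def alg4(matrix, h):
--     m, n = len(matrix), len(matrix[0])
--
--     # converting elements under threshold to 0 and rest as 1
--     binaryMatrix = [[0] * (n) for _ in range(m)]
--     for i in range(m):
--         for j in range(n):
--             binaryMatrix[i][j] = 0 if matrix[i][j]<h else 1
--
--     # create prefix sum
--     prefixSum = [[0] * (n + 1) for _ in range(m + 1)]
--     for i in range(1, m + 1):
--         for j in range(1, n + 1):
--             prefixSum[i][j] = prefixSum[i - 1][j] + prefixSum[i][j - 1] - prefixSum[i - 1][j - 1] + binaryMatrix[i - 1][j - 1]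
--
--     i1,j1,i2,j2 = 0,0,0,0
--     maxSquareSize = 0
--     for i in range(m):
--         for j in range(n):
--             # above two for loops for selecting an element
--             for k in range(1,min(m-i,n-j)+1):
--                 # above for loop for incrementing the diagonal element
--                 subSquareSum = prefixSum[i+k][j+k] - prefixSum[i][j+k] - prefixSum[i+k][j] + prefixSum[i][j]
--                 cornerSum = 0
--                 if k>1:
--                     cornerSum = binaryMatrix[i][j] + binaryMatrix[i+k-1][j+k-1] + binaryMatrix[i][j+k-1] + binaryMatrix[i+k-1][j]
--                 else:
--                     cornerSum = binaryMatrix[i][j]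
--                 # inside sum is sum of subsquare minus the sum of corners, that should be greater than max no of 1s -4 1s belonging to corner
--                 insideSum = subSquareSum-cornerSum
--                 if insideSum>=(k*k-4):
--                     if k>=maxSquareSize:
--                         maxSquareSize = k
--                         i1, j1 = i+1, j+1
--                         i2, j2 = i1+k-1, j1+k-1
--     return i1,j1,i2,j2
-- ===== SOURCE B (Python) =====
-- def alg4(matrix, h):
--     # B: counts ZEROS instead of summing ones: per-row prefix counts of
--     # below-threshold entries replace the binary matrix + 2D prefix table;
--     # a square is admissible iff its zero count does not exceed the zero count
--     # of its 4 corners (sizes <= 2 always are), zeros summed row by row with an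
--     # early cut once the count exceeds 4; per cell, sizes are scanned downward
--     # and the first admissible one wins.
--     m, n = len(matrix), len(matrix[0])
--
--     zpre = []
--     for row in matrix:
--         p = [0]
--         s = 0
--         for j in range(n):
--             s += 1 if row[j] < h else 0
--             p.append(s)
--         zpre.append(p)
--
--     def zeros_capped(i, j, k):
--         z = 0
--         for r in range(i, i + k):
--             z += zpre[r][j + k] - zpre[r][j]
--             if z > 4:
--                 break
--         return z
--
--     def admissible(i, j, k):
--         if k <= 2:
--             return True
--         zc = (1 if matrix[i][j] < h else 0) \
--            + (1 if matrix[i][j + k - 1] < h else 0) \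
--            + (1 if matrix[i + k - 1][j] < h else 0) \
--            + (1 if matrix[i + k - 1][j + k - 1] < h else 0)
--         return zeros_capped(i, j, k) <= zc
--
--     best = 0
--     res = (0, 0, 0, 0)
--     for i in range(m):
--         for j in range(n):
--             for k in range(min(m - i, n - j), 0, -1):
--                 if admissible(i, j, k):
--                     if best <= k:
--                         best = k
--                         res = (i + 1, j + 1, i + k, j + k)
--                     break
--     return res
-- ===== Notes on version B (the rewrite author's own statement) =====
-- stated objective: alternative
-- what changed: B replaces A's binary matrix + 2D prefix-sum table and full ascending size scan by per-row prefix counts of below-threshold entries and the dual test 'zeros in the square <= zeros among its 4 corners' (sizes <= 2 always pass), zeros accumulated row by row with an early cut at 4, scanning sizes downward per cell to the first admissible.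
import Mathlib
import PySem

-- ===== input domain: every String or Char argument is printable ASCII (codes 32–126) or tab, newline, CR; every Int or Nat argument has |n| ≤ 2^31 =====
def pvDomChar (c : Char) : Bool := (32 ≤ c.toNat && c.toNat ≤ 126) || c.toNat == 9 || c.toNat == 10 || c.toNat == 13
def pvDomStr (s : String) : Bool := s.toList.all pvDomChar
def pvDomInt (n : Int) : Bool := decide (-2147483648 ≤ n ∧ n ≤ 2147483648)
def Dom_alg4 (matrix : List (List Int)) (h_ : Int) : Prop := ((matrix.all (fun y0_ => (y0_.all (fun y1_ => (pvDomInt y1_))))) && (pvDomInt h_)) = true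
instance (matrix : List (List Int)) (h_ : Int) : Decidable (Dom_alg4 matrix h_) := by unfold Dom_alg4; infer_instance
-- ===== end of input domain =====

-- B replaces A's binary matrix + 2D prefix-sum table and full ascending size scan
-- by per-row prefix counts of below-threshold entries and the dual test
-- "zeros in the square ≤ zeros among its 4 corners" (sizes ≤ 2 always pass),
-- zeros summed row by row with an early cut once they exceed 4, scanning sizes
-- downward per cell to the first admissible one (alternative).

-- ===== PORT A =====
-- 2D read used by port A (Python's prefixSum[i][j] / binaryMatrix[i][j]; indices in range on Pre_)
def pvGd (ps : List (List Int)) (i j : Nat) : Int := (ps.getD i []).getD j 0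

-- binaryMatrix = [[0]*n for _ in range(m)]; nested assignment loop
def pvBmA (matrix : List (List Int)) (h_ : Int) : List (List Int) :=
  let m := matrix.length
  let n := matrix.headI.length
  (List.range m).foldl (fun b i =>
    (List.range n).foldl (fun b j =>
      b.set i ((b.getD i []).set j (if (matrix.getD i []).getD j 0 < h_ then 0 else 1))) b)
    (List.replicate m (List.replicate n (0:Int)))

-- prefixSum = [[0]*(n+1) for _ in range(m+1)]; loops i in range(1,m+1), j in range(1,n+1);
-- here t = i-1 and u = j-1, so the written cell is (t+1, u+1)
def pvPsA (matrix : List (List Int)) (h_ : Int) : List (List Int) :=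
  let m := matrix.length
  let n := matrix.headI.length
  (List.range m).foldl (fun p t =>
    (List.range n).foldl (fun p u =>
      p.set (t+1) ((p.getD (t+1) []).set (u+1)
        (pvGd p t (u+1) + pvGd p (t+1) u - pvGd p t u + pvGd (pvBmA matrix h_) t u))) p)
    (List.replicate (m+1) (List.replicate (n+1) (0:Int)))

-- the triple loop; state ((i1, j1, i2, j2), maxSquareSize)
def pvRunA (matrix : List (List Int)) (h_ : Int) : (Nat × Nat × Nat × Nat) × Nat :=
  let m := matrix.length
  let n := matrix.headI.length
  (List.range m).foldl (fun (st : (Nat × Nat × Nat × Nat) × Nat) i =>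
    (List.range n).foldl (fun st j =>
      ((List.range (min (m - i) (n - j))).map (· + 1)).foldl (fun st (k : Nat) =>
        if (k:Int)*(k:Int) - 4 ≤
            (pvGd (pvPsA matrix h_) (i+k) (j+k) - pvGd (pvPsA matrix h_) i (j+k) -
             pvGd (pvPsA matrix h_) (i+k) j + pvGd (pvPsA matrix h_) i j) -
            (if 1 < k then
              pvGd (pvBmA matrix h_) i j + pvGd (pvBmA matrix h_) (i+k-1) (j+k-1) +
              pvGd (pvBmA matrix h_) i (j+k-1) + pvGd (pvBmA matrix h_) (i+k-1) j
             else pvGd (pvBmA matrix h_) i j) then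
          (if st.2 ≤ k then ((i+1, j+1, i+1+k-1, j+1+k-1), k) else st)
        else st) st) st)
    (((0,0,0,0), 0))

def alg4 (matrix : List (List Int)) (h_ : Int) : Int × Int × Int × Int :=
  (((pvRunA matrix h_).1.1 : Int), ((pvRunA matrix h_).1.2.1 : Int),
   ((pvRunA matrix h_).1.2.2.1 : Int), ((pvRunA matrix h_).1.2.2.2 : Int))

-- ===== PORT B =====
-- for k in range(K, 0, -1): the first admissible size (the loop breaks there), 0 if none
def pvDown (p : Nat → Bool) : Nat → Nat
  | 0 => 0
  | k+1 => if p (k+1) then k+1 else pvDown p k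

-- zpre: per-row prefix counts of entries below the threshold, built with a running sum s
def pvZpre (matrix : List (List Int)) (h_ : Int) : List (List Int) :=
  matrix.foldl (fun acc row =>
    acc ++ [((List.range matrix.headI.length).foldl (fun (ps : List Int × Int) j =>
      (ps.1 ++ [ps.2 + (if row.getD j 0 < h_ then 1 else 0)],
       ps.2 + (if row.getD j 0 < h_ then 1 else 0))) ([0], 0)).1]) []

-- zeros_capped: z += zpre[r][j+k] - zpre[r][j] over r in range(i, i+k), break once z > 4
def pvZCap (zp : List (List Int)) (j k : Nat) : List Nat → Int → Int
  | [], z => z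
  | r :: rs, z =>
    if 4 < z + ((zp.getD r []).getD (j+k) 0 - (zp.getD r []).getD j 0) then
      z + ((zp.getD r []).getD (j+k) 0 - (zp.getD r []).getD j 0)
    else pvZCap zp j k rs (z + ((zp.getD r []).getD (j+k) 0 - (zp.getD r []).getD j 0))

-- admissible(i, j, k): k ≤ 2, or zeros in the square ≤ zeros among its 4 corners
def pvAdm (matrix : List (List Int)) (h_ : Int) (i j k : Nat) : Bool :=
  decide (k ≤ 2) ||
  decide (pvZCap (pvZpre matrix h_) j k (List.range' i k) 0 ≤
    (if (matrix.getD i []).getD j 0 < h_ then (1:Int) else 0) +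
    (if (matrix.getD i []).getD (j+k-1) 0 < h_ then (1:Int) else 0) +
    (if (matrix.getD (i+k-1) []).getD j 0 < h_ then (1:Int) else 0) +
    (if (matrix.getD (i+k-1) []).getD (j+k-1) 0 < h_ then (1:Int) else 0))

def pvRunB (matrix : List (List Int)) (h_ : Int) : (Nat × Nat × Nat × Nat) × Nat :=
  let m := matrix.length
  let n := matrix.headI.length
  (List.range m).foldl (fun st i =>
    (List.range n).foldl (fun (st : (Nat × Nat × Nat × Nat) × Nat) j =>
      let k := pvDown (pvAdm matrix h_ i j) (min (m - i) (n - j))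
      if st.2 ≤ k ∧ 0 < k then ((i+1, j+1, i+k, j+k), k) else st) st)
    (((0,0,0,0), 0))

def alg4_alt (matrix : List (List Int)) (h_ : Int) : Int × Int × Int × Int :=
  (((pvRunB matrix h_).1.1 : Int), ((pvRunB matrix h_).1.2.1 : Int),
   ((pvRunB matrix h_).1.2.2.1 : Int), ((pvRunB matrix h_).1.2.2.2 : Int))

-- ===== PRECONDITION & SPEC =====
-- Pre_ excludes exactly the inputs where Python A raises: the empty matrix
-- (matrix[0] → IndexError) and matrices with a row shorter than row 0
-- (matrix[i][j] → IndexError). Rows longer than row 0 are accepted.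
def Pre_alg4 (matrix : List (List Int)) (h_ : Int) : Prop :=
  matrix ≠ [] ∧ ∀ row ∈ matrix, matrix.headI.length ≤ row.length
instance (matrix : List (List Int)) (h_ : Int) : Decidable (Pre_alg4 matrix h_) := by
  unfold Pre_alg4; infer_instance
def pvWitness_alg4 : List (List Int) × Int := ([[1, 2], [3, 0]], 1)

def Spec_alg4 (matrix : List (List Int)) (h_ : Int) (out : Int × Int × Int × Int) : Prop := out = alg4_alt matrix h_
instance (matrix : List (List Int)) (h_ : Int) (out : Int × Int × Int × Int) : Decidable (Spec_alg4 matrix h_ out) := by unfold Spec_alg4; infer_instance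

-- ===== CLAIM (what is proved, stated in full; the proofs are below) =====
def Claim_equal_alg4 : Prop := ∀ (matrix : List (List Int)) (h_ : Int), Dom_alg4 matrix h_ → Pre_alg4 matrix h_ → Spec_alg4 matrix h_ (alg4 matrix h_)

-- ===== LEMMAS AND PROOFS =====

-- the thresholded entry (what binaryMatrix[i][j] holds) and its zero-indicator dual
def pvBij (matrix : List (List Int)) (h_ : Int) (i j : Nat) : Int :=
  if (matrix.getD i []).getD j 0 < h_ then 0 else 1

def pvZbit (matrix : List (List Int)) (h_ : Int) (i j : Nat) : Int :=
  if (matrix.getD i []).getD j 0 < h_ then 1 else 0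

-- the ideal prefix-sum table of A's recurrence
def pvF (b : Nat → Nat → Int) : Nat → Nat → Int
  | 0, _ => 0
  | _+1, 0 => 0
  | i+1, j+1 => pvF b i (j+1) + pvF b (i+1) j - pvF b i j + b i j
  termination_by i j => (i, j)

-- row prefix sums and the row-accumulated table
def pvS (b : Nat → Nat → Int) (i : Nat) : Nat → Int
  | 0 => 0
  | t+1 => pvS b i t + b i t

def pvG (b : Nat → Nat → Int) : Nat → Nat → Int
  | 0, _ => 0
  | i+1, y => pvG b i y + pvS b i y

theorem pvF_zero_left (b : Nat → Nat → Int) (j : Nat) : pvF b 0 j = 0 := by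
  simp [pvF]

theorem pvF_zero_right (b : Nat → Nat → Int) (i : Nat) : pvF b i 0 = 0 := by
  cases i <;> simp [pvF]

theorem pvF_eq_pvG (b : Nat → Nat → Int) : ∀ i j, pvF b i j = pvG b i j := by
  intro i
  induction i with
  | zero => intro j; simp [pvF, pvG]
  | succ i ihi =>
    intro j
    induction j with
    | zero =>
      have h0 := ihi 0
      have h1 : pvF b (i+1) 0 = 0 := pvF_zero_right b (i+1)
      have h2 : pvG b (i+1) 0 = pvG b i 0 + pvS b i 0 := by simp [pvG]
      have h3 : pvS b i 0 = 0 := rfl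
      have h4 : pvF b i 0 = 0 := pvF_zero_right b i
      omega
    | succ j ihj =>
      have h1 := ihi (j+1)
      have h2 := ihi j
      have e1 : pvF b (i+1) (j+1) = pvF b i (j+1) + pvF b (i+1) j - pvF b i j + b i j := by
        simp [pvF]
      have e2 : pvG b (i+1) (j+1) = pvG b i (j+1) + pvS b i (j+1) := by simp [pvG]
      have e3 : pvG b (i+1) j = pvG b i j + pvS b i j := by simp [pvG]
      have e4 : pvS b i (j+1) = pvS b i j + b i j := by simp [pvS]
      omega

-- generic induction principle for foldl over List.range
theorem foldl_range_ind {α : Type} (step : α → Nat → α) (P : α → Nat → Prop) (n : Nat)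
    (a : α) (h0 : P a 0) (hs : ∀ s t, t < n → P s t → P (step s t) (t+1)) :
    P ((List.range n).foldl step a) n := by
  induction n with
  | zero => simpa using h0
  | succ n ih =>
    rw [List.range_succ, List.foldl_append]
    exact hs _ n (Nat.lt_succ_self n) (ih (fun s t ht => hs s t (Nat.lt_succ_of_lt ht)))

theorem getD_set_eq {α : Type} (l : List α) (i j : Nat) (v : α) (d : α) :
    (l.set i v).getD j d = if i = j ∧ i < l.length then v else l.getD j d := by
  simp only [List.getD_eq_getElem?_getD, List.getElem?_set]
  by_cases h : i = j
  · subst h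
    by_cases hl : i < l.length
    · simp [hl]
    · simp [hl]
  · simp [h]

theorem getD_map_range' {α : Type} (f : Nat → α) (k y : Nat) (d : α) :
    ((List.range k).map f).getD y d = if y < k then f y else d := by
  by_cases h : y < k
  · simp [List.getD_eq_getElem?_getD, h]
  · have hn : (List.range k)[y]? = none :=
      List.getElem?_eq_none (by simpa using (by omega : k ≤ y))
    simp [List.getD_eq_getElem?_getD, hn, h]

theorem getD_replicate_lt {α : Type} (m x : Nat) (r d : α) (hx : x < m) :
    (List.replicate m r).getD x d = r := by
  simp [List.getD_eq_getElem?_getD, List.getElem?_replicate, hx]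

theorem getD_replicate_zero (k y : Nat) :
    (List.replicate k (0:Int)).getD y 0 = 0 := by
  by_cases h : y < k
  · simp [List.getD_eq_getElem?_getD, h]
  · have hn : (List.replicate k (0:Int))[y]? = none :=
      List.getElem?_eq_none (by simpa using (by omega : k ≤ y))
    simp [List.getD_eq_getElem?_getD, hn]

theorem pvDown_le (p : Nat → Bool) (K : Nat) : pvDown p K ≤ K := by
  induction K with
  | zero => simp [pvDown]
  | succ K ih =>
    simp only [pvDown]
    split
    · exact Nat.le_refl _
    · exact Nat.le_succ_of_le ih

theorem pvDown_congr (p q : Nat → Bool) (K : Nat)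
    (h : ∀ k, 1 ≤ k → k ≤ K → p k = q k) : pvDown p K = pvDown q K := by
  induction K with
  | zero => rfl
  | succ K ih =>
    simp only [pvDown, h (K+1) (by omega) (by omega)]
    split
    · rfl
    · exact ih (fun k h1 h2 => h k h1 (by omega))

-- A's ascending conditional scan equals "update with the largest passing size"
theorem inner_fold_eq (P : Nat → Prop) [DecidablePred P] (c : Nat → Nat × Nat × Nat × Nat)
    (K : Nat) (st : (Nat × Nat × Nat × Nat) × Nat) :
    ((List.range K).map (· + 1)).foldl
      (fun st k => if P k then (if st.2 ≤ k then (c k, k) else st) else st) st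
    = (if st.2 ≤ pvDown (fun k => decide (P k)) K ∧ 0 < pvDown (fun k => decide (P k)) K
        then (c (pvDown (fun k => decide (P k)) K), pvDown (fun k => decide (P k)) K)
        else st) := by
  induction K with
  | zero => simp [pvDown]
  | succ K ih =>
    rw [List.range_succ, List.map_append, List.foldl_append, ih]
    have hle := pvDown_le (fun k => decide (P k)) K
    simp only [List.map_cons, List.map_nil, List.foldl_cons, List.foldl_nil, pvDown,
      decide_eq_true_eq]
    by_cases hp : P (K+1)
    · simp only [hp, if_true]
      by_cases hc : st.2 ≤ pvDown (fun k => decide (P k)) K ∧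
          0 < pvDown (fun k => decide (P k)) K
      · rw [if_pos hc]
        have h1 : (c (pvDown (fun k => decide (P k)) K),
            pvDown (fun k => decide (P k)) K).2 ≤ K + 1 := by simp; omega
        rw [if_pos h1, if_pos ⟨by omega, by omega⟩]
      · rw [if_neg hc]
        by_cases hs : st.2 ≤ K + 1
        · rw [if_pos hs, if_pos ⟨hs, by omega⟩]
        · rw [if_neg hs, if_neg (fun hh => hs hh.1)]
    · simp [hp]

theorem fill2_char (g : Nat → Nat → Int) (m n : Nat) (x y : Nat) (hx : x < m) (hy : y < n) :
    pvGd ((List.range m).foldl (fun b i =>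
      (List.range n).foldl (fun b j =>
        b.set i ((b.getD i []).set j (g i j))) b)
      (List.replicate m (List.replicate n (0:Int)))) x y = g x y := by
  have main := foldl_range_ind
    (fun b i => (List.range n).foldl (fun b j => b.set i ((b.getD i []).set j (g i j))) b)
    (fun b t => b.length = m ∧ (∀ x, x < m → (b.getD x []).length = n) ∧
      ∀ x y, x < m → y < n → pvGd b x y = if x < t then g x y else 0)
    m (List.replicate m (List.replicate n (0:Int)))
    ⟨by simp,
     fun x hx => by rw [getD_replicate_lt _ _ _ _ hx]; simp,
     fun x y hx hy => by
      simp only [pvGd]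
      rw [getD_replicate_lt _ _ _ _ hx, getD_replicate_zero]
      simp⟩
    ?_
  · obtain ⟨-, -, h⟩ := main
    rw [h x y hx hy, if_pos hx]
  intro b t ht hP
  obtain ⟨hlen, hrow, hval⟩ := hP
  have inner := foldl_range_ind
    (fun b j => b.set t ((b.getD t []).set j (g t j)))
    (fun b u => b.length = m ∧ (∀ x, x < m → (b.getD x []).length = n) ∧
      ∀ x y, x < m → y < n → pvGd b x y = if x < t ∨ (x = t ∧ y < u) then g x y else 0)
    n b
    ⟨hlen, hrow, fun x y hx hy => by
      rw [hval x y hx hy]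
      exact if_congr (by omega) rfl rfl⟩
    ?_
  · obtain ⟨l1, l2, l3⟩ := inner
    refine ⟨l1, l2, fun x y hx hy => ?_⟩
    rw [l3 x y hx hy]
    exact if_congr (by omega) rfl rfl
  intro b u hu hQ
  obtain ⟨qlen, qrow, qval⟩ := hQ
  have htb : t < b.length := by omega
  refine ⟨by simpa using qlen, ?_, ?_⟩
  · intro x hx
    rw [getD_set_eq]
    by_cases hc : t = x ∧ t < b.length
    · rw [if_pos hc, List.length_set]; exact qrow t ht
    · rw [if_neg hc]; exact qrow x hx
  · intro x y hx hy
    simp only [pvGd]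
    rw [getD_set_eq]
    by_cases hc : t = x ∧ t < b.length
    · obtain ⟨hc1, -⟩ := hc
      subst hc1
      rw [if_pos ⟨rfl, htb⟩, getD_set_eq]
      have hrl : (b.getD t []).length = n := qrow t ht
      by_cases hc2 : u = y ∧ u < (b.getD t []).length
      · obtain ⟨hc2, -⟩ := hc2
        subst hc2
        rw [if_pos ⟨rfl, by omega⟩, if_pos (by omega)]
      · have huy : ¬ u = y := by
          intro he; exact hc2 ⟨he, by omega⟩
        rw [if_neg hc2]
        have := qval t y ht hy
        simp only [pvGd] at this
        rw [this]
        exact if_congr (by simp only [true_and]; omega) rfl rfl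
    · have hxt : ¬ t = x := fun he => hc ⟨he, htb⟩
      rw [if_neg hc]
      have := qval x y hx hy
      simp only [pvGd] at this
      rw [this]
      exact if_congr (by omega) rfl rfl

theorem pvBmA_char (matrix : List (List Int)) (h_ : Int) (x y : Nat)
    (hx : x < matrix.length) (hy : y < matrix.headI.length) :
    pvGd (pvBmA matrix h_) x y = pvBij matrix h_ x y := by
  unfold pvBmA pvBij
  exact fill2_char (fun i j => if (matrix.getD i []).getD j 0 < h_ then 0 else 1)
    matrix.length matrix.headI.length x y hx hy

theorem psfill_char (g : Nat → Nat → Int) (m n : Nat) (x y : Nat) (hx : x ≤ m) (hy : y ≤ n) :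
    pvGd ((List.range m).foldl (fun p t =>
      (List.range n).foldl (fun p u =>
        p.set (t+1) ((p.getD (t+1) []).set (u+1)
          (pvGd p t (u+1) + pvGd p (t+1) u - pvGd p t u + g t u))) p)
      (List.replicate (m+1) (List.replicate (n+1) (0:Int)))) x y = pvF g x y := by
  have main := foldl_range_ind
    (fun p t => (List.range n).foldl (fun p u =>
        p.set (t+1) ((p.getD (t+1) []).set (u+1)
          (pvGd p t (u+1) + pvGd p (t+1) u - pvGd p t u + g t u))) p)
    (fun p t => p.length = m+1 ∧ (∀ x, x ≤ m → (p.getD x []).length = n+1) ∧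
      ∀ x y, x ≤ m → y ≤ n → pvGd p x y = if x ≤ t then pvF g x y else 0)
    m (List.replicate (m+1) (List.replicate (n+1) (0:Int)))
    ⟨by simp,
     fun x hx => by rw [getD_replicate_lt _ _ _ _ (by omega)]; simp,
     fun x y hx hy => by
      simp only [pvGd]
      rw [getD_replicate_lt _ _ _ _ (by omega), getD_replicate_zero]
      by_cases h0 : x ≤ 0
      · have hx0 : x = 0 := by omega
        subst hx0
        rw [if_pos (Nat.le_refl 0), pvF_zero_left]
      · rw [if_neg h0]⟩
    ?_
  · obtain ⟨-, -, h⟩ := main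
    rw [h x y hx hy, if_pos hx]
  intro p t ht hP
  obtain ⟨hlen, hrow, hval⟩ := hP
  have inner := foldl_range_ind
    (fun p u => p.set (t+1) ((p.getD (t+1) []).set (u+1)
        (pvGd p t (u+1) + pvGd p (t+1) u - pvGd p t u + g t u)))
    (fun p u => p.length = m+1 ∧ (∀ x, x ≤ m → (p.getD x []).length = n+1) ∧
      ∀ x y, x ≤ m → y ≤ n → pvGd p x y = if x ≤ t ∨ (x = t+1 ∧ y ≤ u) then pvF g x y else 0)
    n p
    ⟨hlen, hrow, fun x y hx hy => by
      rw [hval x y hx hy]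
      by_cases h1 : x ≤ t
      · rw [if_pos h1, if_pos (Or.inl h1)]
      · rw [if_neg h1]
        by_cases h2 : x = t+1 ∧ y ≤ 0
        · rw [if_pos (Or.inr h2)]
          have hy0 : y = 0 := by omega
          subst hy0
          rw [pvF_zero_right]
        · rw [if_neg (by tauto)]⟩
    ?_
  · obtain ⟨l1, l2, l3⟩ := inner
    refine ⟨l1, l2, fun x y hx hy => ?_⟩
    rw [l3 x y hx hy]
    exact if_congr (by omega) rfl rfl
  intro p u hu hQ
  obtain ⟨qlen, qrow, qval⟩ := hQ
  have htp : t + 1 < p.length := by omega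
  have hVt1 : pvGd p t (u+1) = pvF g t (u+1) := by
    rw [qval t (u+1) (by omega) (by omega)]
    rw [if_pos (Or.inl (Nat.le_refl t))]
  have hVt2 : pvGd p (t+1) u = pvF g (t+1) u := by
    rw [qval (t+1) u (by omega) (by omega)]
    rw [if_pos (Or.inr ⟨rfl, Nat.le_refl u⟩)]
  have hVt3 : pvGd p t u = pvF g t u := by
    rw [qval t u (by omega) (by omega), if_pos (Or.inl (Nat.le_refl t))]
  have hV : pvGd p t (u+1) + pvGd p (t+1) u - pvGd p t u + g t u = pvF g (t+1) (u+1) := by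
    rw [hVt1, hVt2, hVt3]
    simp [pvF]
  refine ⟨by simpa using qlen, ?_, ?_⟩
  · intro x hx
    rw [getD_set_eq]
    by_cases hc : t+1 = x ∧ t+1 < p.length
    · rw [if_pos hc, List.length_set]; exact qrow (t+1) (by omega)
    · rw [if_neg hc]; exact qrow x hx
  · intro x y hx hy
    simp only [pvGd]
    rw [getD_set_eq]
    by_cases hc : t+1 = x ∧ t+1 < p.length
    · obtain ⟨hc1, -⟩ := hc
      subst hc1
      rw [if_pos ⟨rfl, htp⟩, getD_set_eq]
      have hrl : (p.getD (t+1) []).length = n+1 := qrow (t+1) (by omega)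
      by_cases hc2 : u+1 = y ∧ u+1 < (p.getD (t+1) []).length
      · obtain ⟨hc2, -⟩ := hc2
        subst hc2
        simp only [pvGd] at hV
        rw [if_pos ⟨rfl, by omega⟩, hV, if_pos (Or.inr ⟨rfl, Nat.le_refl _⟩)]
      · have huy : ¬ u+1 = y := by
          intro he; exact hc2 ⟨he, by omega⟩
        rw [if_neg hc2]
        have hq := qval (t+1) y (by omega) hy
        simp only [pvGd] at hq
        rw [hq]
        exact if_congr (by simp only [true_and]; omega) rfl rfl
    · have hxt : ¬ t+1 = x := fun he => hc ⟨he, htp⟩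
      rw [if_neg hc]
      have hq := qval x y hx hy
      simp only [pvGd] at hq
      rw [hq]
      exact if_congr (by omega) rfl rfl

theorem pvPsA_char (matrix : List (List Int)) (h_ : Int) (x y : Nat)
    (hx : x ≤ matrix.length) (hy : y ≤ matrix.headI.length) :
    pvGd (pvPsA matrix h_) x y = pvF (pvBij matrix h_) x y := by
  unfold pvPsA
  have hcong :
      (List.range matrix.length).foldl (fun p t =>
        (List.range matrix.headI.length).foldl (fun p u =>
          p.set (t+1) ((p.getD (t+1) []).set (u+1)
            (pvGd p t (u+1) + pvGd p (t+1) u - pvGd p t u + pvGd (pvBmA matrix h_) t u))) p)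
        (List.replicate (matrix.length+1) (List.replicate (matrix.headI.length+1) (0:Int)))
      = (List.range matrix.length).foldl (fun p t =>
        (List.range matrix.headI.length).foldl (fun p u =>
          p.set (t+1) ((p.getD (t+1) []).set (u+1)
            (pvGd p t (u+1) + pvGd p (t+1) u - pvGd p t u + pvBij matrix h_ t u))) p)
        (List.replicate (matrix.length+1) (List.replicate (matrix.headI.length+1) (0:Int))) := by
    apply PySem.List.foldl_congr_mem
    intro p t htm
    apply PySem.List.foldl_congr_mem
    intro p u hun
    rw [pvBmA_char matrix h_ t u (List.mem_range.mp htm) (List.mem_range.mp hun)]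
  rw [hcong]
  exact psfill_char (pvBij matrix h_) matrix.length matrix.headI.length x y hx hy

-- ===== B-side characterisations =====

theorem pv_sum_map_add (l : List Nat) (f g : Nat → Int) :
    (l.map (fun x => f x + g x)).sum = (l.map f).sum + (l.map g).sum := by
  induction l with
  | nil => simp
  | cons x l ih => simp only [List.map_cons, List.sum_cons, ih]; ring

theorem pv_sum_pair (l : List Nat) (f g : Nat → Int) (c : Int)
    (h : ∀ x ∈ l, f x + g x = c) :
    (l.map f).sum + (l.map g).sum = l.length * c := by
  induction l with
  | nil => simp
  | cons x l ih =>
    simp only [List.map_cons, List.sum_cons, List.length_cons]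
    have h1 := h x (List.mem_cons_self)
    have h2 := ih (fun y hy => h y (List.mem_cons_of_mem _ hy))
    have h3 : ((l.length : Int) + 1) * c = (l.length : Int) * c + c := by ring
    push_cast
    linarith

theorem pvS_split (b : Nat → Nat → Int) (r : Nat) :
    ∀ k j, pvS b r (j+k) = pvS b r j + ((List.range' j k).map (fun t => b r t)).sum := by
  intro k
  induction k with
  | zero => intro j; simp
  | succ k ih =>
    intro j
    have h1 : j + (k+1) = (j+1) + k := by omega
    rw [h1, ih (j+1), List.range'_succ]
    have h2 : pvS b r (j+1) = pvS b r j + b r j := rfl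
    simp only [List.map_cons, List.sum_cons]
    rw [h2]
    ring

theorem pvG_tele (b : Nat → Nat → Int) (y : Nat) :
    ∀ k i, pvG b (i+k) y = pvG b i y + ((List.range' i k).map (fun r => pvS b r y)).sum := by
  intro k
  induction k with
  | zero => intro i; simp
  | succ k ih =>
    intro i
    have h1 : i + (k+1) = (i+1) + k := by omega
    rw [h1, ih (i+1), List.range'_succ]
    have h2 : pvG b (i+1) y = pvG b i y + pvS b i y := by simp [pvG]
    simp only [List.map_cons, List.sum_cons]
    rw [h2]
    ring

theorem pvZbit_nonneg (matrix : List (List Int)) (h_ : Int) (x y : Nat) :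
    0 ≤ pvZbit matrix h_ x y ∧ pvZbit matrix h_ x y ≤ 1 := by
  unfold pvZbit; split <;> norm_num

theorem pvCompl (matrix : List (List Int)) (h_ : Int) (x y : Nat) :
    pvBij matrix h_ x y + pvZbit matrix h_ x y = 1 := by
  unfold pvBij pvZbit; split_ifs <;> norm_num

-- the capped zero loop either equals the full sum or both sides exceed 4
theorem pvZCap_spec (zp : List (List Int)) (j k : Nat) (f : Nat → Int) (l : List Nat)
    (hf : ∀ r ∈ l, (zp.getD r []).getD (j+k) 0 - (zp.getD r []).getD j 0 = f r)
    (hnn : ∀ r ∈ l, 0 ≤ f r) :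
    ∀ z, pvZCap zp j k l z = z + (l.map f).sum ∨
         (4 < pvZCap zp j k l z ∧ 4 < z + (l.map f).sum) := by
  induction l with
  | nil => intro z; left; simp [pvZCap]
  | cons r rs ih =>
    intro z
    have hr := hf r List.mem_cons_self
    have hsum : 0 ≤ (rs.map f).sum := by
      apply List.sum_nonneg
      intro x hx
      obtain ⟨a, ha, rfl⟩ := List.mem_map.mp hx
      exact hnn a (List.mem_cons_of_mem _ ha)
    simp only [pvZCap, hr]
    by_cases hc : 4 < z + f r
    · rw [if_pos hc]
      right
      refine ⟨hc, ?_⟩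
      simp only [List.map_cons, List.sum_cons]
      linarith
    · rw [if_neg hc]
      rcases ih (fun x hx => hf x (List.mem_cons_of_mem _ hx))
        (fun x hx => hnn x (List.mem_cons_of_mem _ hx)) (z + f r) with h | h
      · left
        simp only [List.map_cons, List.sum_cons]
        rw [h]; ring
      · right
        simp only [List.map_cons, List.sum_cons]
        exact ⟨h.1, by linarith [h.2]⟩

theorem pvZpre_aux (matrix : List (List Int)) (h_ : Int) :
    ∀ (rows : List (List Int)) (i0 : Nat) (acc : List (List Int)),
      matrix.drop i0 = rows →
      (rows.foldl (fun acc row =>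
        acc ++ [((List.range matrix.headI.length).foldl (fun (ps : List Int × Int) j =>
          (ps.1 ++ [ps.2 + (if row.getD j 0 < h_ then 1 else 0)],
           ps.2 + (if row.getD j 0 < h_ then 1 else 0))) ([0], 0)).1]) acc)
      = acc ++ (List.range rows.length).map
          (fun r => (List.range (matrix.headI.length+1)).map (pvS (pvZbit matrix h_) (i0+r))) := by
  intro rows
  induction rows with
  | nil => intro i0 acc hdrop; simp
  | cons row rows ih =>
    intro i0 acc hdrop
    rw [List.foldl_cons]
    have hrow : matrix.getD i0 [] = row := by
      have h0 : matrix[i0]? = some row := by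
        have h1 : (List.drop i0 matrix)[0]? = matrix[i0 + 0]? := List.getElem?_drop
        rw [hdrop] at h1
        simpa using h1.symm
      simp [List.getD_eq_getElem?_getD, h0]
    have hbit : ∀ t, (if row.getD t 0 < h_ then (1:Int) else 0) = pvZbit matrix h_ i0 t := by
      intro t; rw [pvZbit, hrow]
    have hcur := foldl_range_ind
      (fun (ps : List Int × Int) j =>
        (ps.1 ++ [ps.2 + (if row.getD j 0 < h_ then 1 else 0)],
         ps.2 + (if row.getD j 0 < h_ then 1 else 0)))
      (fun ps t => ps.1 = (List.range (t+1)).map (pvS (pvZbit matrix h_) i0) ∧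
        ps.2 = pvS (pvZbit matrix h_) i0 t)
      matrix.headI.length ([0], 0)
      ⟨by rw [List.range_one]; simp [pvS], rfl⟩
      ?_
    · obtain ⟨hc1, hc2⟩ := hcur
      rw [hc1]
      have hdrop' : matrix.drop (i0+1) = rows := by
        have h2 : List.drop 1 (List.drop i0 matrix) = List.drop (i0 + 1) matrix := List.drop_drop
        rw [hdrop] at h2
        simpa using h2.symm
      rw [ih (i0+1) (acc ++ [(List.range (matrix.headI.length+1)).map (pvS (pvZbit matrix h_) i0)]) hdrop']
      have hR : (List.range (rows.length+1)).map
            (fun r => (List.range (matrix.headI.length+1)).map (pvS (pvZbit matrix h_) (i0+r)))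
          = ((List.range (matrix.headI.length+1)).map (pvS (pvZbit matrix h_) i0)) ::
            (List.range rows.length).map
              (fun r => (List.range (matrix.headI.length+1)).map (pvS (pvZbit matrix h_) (i0+1+r))) := by
        rw [List.range_succ_eq_map (n := rows.length), List.map_cons, List.map_map]
        refine congrArg₂ List.cons (by simp) ?_
        apply List.map_congr_left
        intro a _
        simp only [Function.comp_apply]
        have he : i0 + Nat.succ a = i0 + 1 + a := by omega
        rw [he]
      simp only [List.length_cons]
      rw [hR, List.append_assoc, List.singleton_append]
    · intro ps t htn hps
      obtain ⟨h1, h2⟩ := hps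
      beta_reduce
      constructor
      · rw [h1, h2, hbit t]
        have hval : pvS (pvZbit matrix h_) i0 t + pvZbit matrix h_ i0 t
            = pvS (pvZbit matrix h_) i0 (t+1) := rfl
        rw [hval, List.range_succ (n := t+1), List.map_append]
        simp
      · rw [h2, hbit t]
        rfl

theorem pvZpre_char (matrix : List (List Int)) (h_ : Int) (r t : Nat)
    (hr : r < matrix.length) (ht : t ≤ matrix.headI.length) :
    ((pvZpre matrix h_).getD r []).getD t 0 = pvS (pvZbit matrix h_) r t := by
  unfold pvZpre
  rw [pvZpre_aux matrix h_ matrix 0 [] (by simp)]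
  simp only [List.nil_append]
  rw [show (fun r => (List.range (matrix.headI.length+1)).map (pvS (pvZbit matrix h_) (0+r)))
      = (fun r => (List.range (matrix.headI.length+1)).map (pvS (pvZbit matrix h_) r)) from by
    funext a; simp]
  rw [show ((List.range matrix.length).map
        (fun r => (List.range (matrix.headI.length+1)).map (pvS (pvZbit matrix h_) r))).getD r []
      = if r < matrix.length then (List.range (matrix.headI.length+1)).map (pvS (pvZbit matrix h_) r) else []
    from getD_map_range' _ _ _ _]
  rw [if_pos hr, getD_map_range', if_pos (by omega)]

-- the per-size predicates of A and B agree on admissible sizes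
theorem pvPred_eq (matrix : List (List Int)) (h_ : Int) (i j k : Nat) (hi : i < matrix.length) (hj : j < matrix.headI.length)
    (h1 : 1 ≤ k) (h2 : k ≤ min (matrix.length - i) (matrix.headI.length - j)) :
    (decide ((k:Int)*(k:Int) - 4 ≤
        (pvGd (pvPsA matrix h_) (i+k) (j+k) - pvGd (pvPsA matrix h_) i (j+k) -
         pvGd (pvPsA matrix h_) (i+k) j + pvGd (pvPsA matrix h_) i j) -
        (if 1 < k then
          pvGd (pvBmA matrix h_) i j + pvGd (pvBmA matrix h_) (i+k-1) (j+k-1) +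
          pvGd (pvBmA matrix h_) i (j+k-1) + pvGd (pvBmA matrix h_) (i+k-1) j
         else pvGd (pvBmA matrix h_) i j)))
    = pvAdm matrix h_ i j k := by
  have h2a : k ≤ matrix.length - i := le_trans h2 (Nat.min_le_left _ _)
  have h2b : k ≤ matrix.headI.length - j := le_trans h2 (Nat.min_le_right _ _)
  have hik : i + k ≤ matrix.length := by omega
  have hjk : j + k ≤ matrix.headI.length := by omega
  have hik1 : i + k - 1 < matrix.length := by omega
  have hjk1 : j + k - 1 < matrix.headI.length := by omega
  rw [pvPsA_char matrix h_ (i+k) (j+k) hik hjk, pvPsA_char matrix h_ i (j+k) (by omega) hjk,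
      pvPsA_char matrix h_ (i+k) j hik (by omega), pvPsA_char matrix h_ i j (by omega) (by omega)]
  rw [pvBmA_char matrix h_ i j hi hj, pvBmA_char matrix h_ (i+k-1) (j+k-1) hik1 hjk1,
      pvBmA_char matrix h_ i (j+k-1) hi hjk1, pvBmA_char matrix h_ (i+k-1) j hik1 hj]
  unfold pvAdm
  have hz : ∀ x y : Nat, (if (matrix.getD x []).getD y 0 < h_ then (1:Int) else 0) = pvZbit matrix h_ x y :=
    fun _ _ => rfl
  simp only [hz]
  rw [show (decide (k ≤ 2) ||
      decide (pvZCap (pvZpre matrix h_) j k (List.range' i k) 0 ≤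
        pvZbit matrix h_ i j + pvZbit matrix h_ i (j+k-1) +
        pvZbit matrix h_ (i+k-1) j + pvZbit matrix h_ (i+k-1) (j+k-1)))
      = decide (k ≤ 2 ∨ pvZCap (pvZpre matrix h_) j k (List.range' i k) 0 ≤
        pvZbit matrix h_ i j + pvZbit matrix h_ i (j+k-1) +
        pvZbit matrix h_ (i+k-1) j + pvZbit matrix h_ (i+k-1) (j+k-1)) from by
    by_cases hA : k ≤ 2 <;>
    by_cases hB : pvZCap (pvZpre matrix h_) j k (List.range' i k) 0 ≤
        pvZbit matrix h_ i j + pvZbit matrix h_ i (j+k-1) +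
        pvZbit matrix h_ (i+k-1) j + pvZbit matrix h_ (i+k-1) (j+k-1) <;>
      simp [hA, hB]]
  simp only [decide_eq_decide]
  -- rectangle sums of ones and of zeros
  have hrect : pvF (pvBij matrix h_) (i+k) (j+k) - pvF (pvBij matrix h_) i (j+k) -
      pvF (pvBij matrix h_) (i+k) j + pvF (pvBij matrix h_) i j
      = ((List.range' i k).map (fun r => ((List.range' j k).map (fun t => pvBij matrix h_ r t)).sum)).sum := by
    rw [pvF_eq_pvG, pvF_eq_pvG, pvF_eq_pvG, pvF_eq_pvG]
    have hA := pvG_tele (pvBij matrix h_) (j+k) k i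
    have hB := pvG_tele (pvBij matrix h_) j k i
    have e1 : (List.range' i k).map (fun r => pvS (pvBij matrix h_) r (j+k))
        = (List.range' i k).map (fun r => pvS (pvBij matrix h_) r j +
            ((List.range' j k).map (fun t => pvBij matrix h_ r t)).sum) :=
      List.map_congr_left (fun r _ => pvS_split (pvBij matrix h_) r k j)
    rw [e1] at hA
    rw [pv_sum_map_add] at hA
    linarith
  rw [hrect]
  -- zeros in the square, as the full double sum
  have hZinner : ∀ r, pvS (pvZbit matrix h_) r (j+k) - pvS (pvZbit matrix h_) r j
      = ((List.range' j k).map (fun t => pvZbit matrix h_ r t)).sum := by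
    intro r
    have := pvS_split (pvZbit matrix h_) r k j
    linarith
  have hcap := pvZCap_spec (pvZpre matrix h_) j k
    (fun r => pvS (pvZbit matrix h_) r (j+k) - pvS (pvZbit matrix h_) r j)
    (List.range' i k)
    (by
      intro r hr
      have hrm : r < matrix.length := by
        have := (List.mem_range'_1.mp hr).2
        omega
      rw [pvZpre_char matrix h_ r (j+k) hrm hjk, pvZpre_char matrix h_ r j hrm (by omega)])
    (by
      intro r _
      show 0 ≤ pvS (pvZbit matrix h_) r (j+k) - pvS (pvZbit matrix h_) r j
      rw [hZinner r]
      apply List.sum_nonneg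
      intro x hx
      obtain ⟨a, ha, rfl⟩ := List.mem_map.mp hx
      exact (pvZbit_nonneg matrix h_ r a).1)
    0
  have hZeq : ((List.range' i k).map
      (fun r => pvS (pvZbit matrix h_) r (j+k) - pvS (pvZbit matrix h_) r j)).sum
      = ((List.range' i k).map (fun r => ((List.range' j k).map (fun t => pvZbit matrix h_ r t)).sum)).sum := by
    exact congrArg List.sum (List.map_congr_left (fun r _ => hZinner r))
  rw [hZeq] at hcap
  -- case split on k
  rcases Nat.lt_or_ge k 3 with h3 | h3
  · interval_cases k
    · -- k = 1
      constructor
      · intro _; exact Or.inl (by norm_num)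
      · intro _
        rw [if_neg (by omega)]
        simp only [List.range']
        simp only [List.map_cons, List.map_nil, List.sum_cons, List.sum_nil]
        push_cast
        linarith
    · -- k = 2
      constructor
      · intro _; exact Or.inl (by norm_num)
      · intro _
        rw [if_pos (by omega)]
        simp only [show ∀ x : Nat, x + 2 - 1 = x + 1 from fun x => rfl]
        simp only [List.range']
        simp only [List.map_cons, List.map_nil, List.sum_cons, List.sum_nil]
        push_cast
        linarith
  · -- k ≥ 3
    have hsq : ((List.range' i k).map (fun r => ((List.range' j k).map (fun t => pvBij matrix h_ r t)).sum)).sum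
        + ((List.range' i k).map (fun r => ((List.range' j k).map (fun t => pvZbit matrix h_ r t)).sum)).sum
        = (k:Int) * (k:Int) := by
      have hout := pv_sum_pair (List.range' i k)
        (fun r => ((List.range' j k).map (fun t => pvBij matrix h_ r t)).sum)
        (fun r => ((List.range' j k).map (fun t => pvZbit matrix h_ r t)).sum)
        (k:Int)
        (by
          intro r _
          have hin := pv_sum_pair (List.range' j k)
            (fun t => pvBij matrix h_ r t) (fun t => pvZbit matrix h_ r t) 1
            (fun t _ => pvCompl matrix h_ r t)
          simpa [List.length_range'] using hin)
      simpa [List.length_range'] using hout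
    have hc1 := pvCompl matrix h_ i j
    have hc2 := pvCompl matrix h_ (i+k-1) (j+k-1)
    have hc3 := pvCompl matrix h_ i (j+k-1)
    have hc4 := pvCompl matrix h_ (i+k-1) j
    have hzb1 := pvZbit_nonneg matrix h_ i j
    have hzb2 := pvZbit_nonneg matrix h_ (i+k-1) (j+k-1)
    have hzb3 := pvZbit_nonneg matrix h_ i (j+k-1)
    have hzb4 := pvZbit_nonneg matrix h_ (i+k-1) j
    rw [if_pos (by omega)]
    constructor
    · intro hP
      right
      have hZle : ((List.range' i k).map
          (fun r => ((List.range' j k).map (fun t => pvZbit matrix h_ r t)).sum)).sum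
          ≤ pvZbit matrix h_ i j + pvZbit matrix h_ i (j+k-1) +
            pvZbit matrix h_ (i+k-1) j + pvZbit matrix h_ (i+k-1) (j+k-1) := by
        linarith
      rcases hcap with hcp | hcp
      · rw [hcp]; linarith
      · exfalso; linarith [hcp.2]
    · intro hQ
      rcases hQ with hQ | hQ
      · omega
      · rcases hcap with hcp | hcp
        · rw [hcp] at hQ
          linarith
        · exfalso; linarith [hcp.1]

theorem pvRun_eq (matrix : List (List Int)) (h_ : Int) :
    pvRunA matrix h_ = pvRunB matrix h_ := by
  simp only [pvRunA, pvRunB]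
  apply PySem.List.foldl_congr_mem
  intro st i hi
  apply PySem.List.foldl_congr_mem
  intro st j hj
  rw [List.mem_range] at hj
  have hi' : i < matrix.length := List.mem_range.mp hi
  rw [inner_fold_eq
    (P := fun k => (k:Int)*(k:Int) - 4 ≤
        (pvGd (pvPsA matrix h_) (i+k) (j+k) - pvGd (pvPsA matrix h_) i (j+k) -
         pvGd (pvPsA matrix h_) (i+k) j + pvGd (pvPsA matrix h_) i j) -
        (if 1 < k then
          pvGd (pvBmA matrix h_) i j + pvGd (pvBmA matrix h_) (i+k-1) (j+k-1) +
          pvGd (pvBmA matrix h_) i (j+k-1) + pvGd (pvBmA matrix h_) (i+k-1) j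
         else pvGd (pvBmA matrix h_) i j))
    (fun k => (i+1, j+1, i+1+k-1, j+1+k-1))
    (min (matrix.length - i) (matrix.headI.length - j)) st]
  have hd : pvDown (fun k => decide ((k:Int)*(k:Int) - 4 ≤
        (pvGd (pvPsA matrix h_) (i+k) (j+k) - pvGd (pvPsA matrix h_) i (j+k) -
         pvGd (pvPsA matrix h_) (i+k) j + pvGd (pvPsA matrix h_) i j) -
        (if 1 < k then
          pvGd (pvBmA matrix h_) i j + pvGd (pvBmA matrix h_) (i+k-1) (j+k-1) +
          pvGd (pvBmA matrix h_) i (j+k-1) + pvGd (pvBmA matrix h_) (i+k-1) j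
         else pvGd (pvBmA matrix h_) i j)))
      (min (matrix.length - i) (matrix.headI.length - j))
      = pvDown (pvAdm matrix h_ i j) (min (matrix.length - i) (matrix.headI.length - j)) :=
    pvDown_congr _ _ _ (fun k hk1 hk2 => pvPred_eq matrix h_ i j k hi' hj hk1 hk2)
  rw [hd]
  set d := pvDown (pvAdm matrix h_ i j) (min (matrix.length - i) (matrix.headI.length - j))
    with hdd
  show (if st.2 ≤ d ∧ 0 < d then ((i+1, j+1, i+1+d-1, j+1+d-1), d) else st)
     = if st.2 ≤ d ∧ 0 < d then ((i+1, j+1, i+d, j+d), d) else st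
  by_cases hc : st.2 ≤ d ∧ 0 < d
  · rw [if_pos hc, if_pos hc]
    have e1 : i+1+d-1 = i+d := by omega
    have e2 : j+1+d-1 = j+d := by omega
    rw [e1, e2]
  · rw [if_neg hc, if_neg hc]

-- ===== VERDICT (by name: the statement is the Claim_ definition above) =====
theorem alg4_spec : Claim_equal_alg4 := by
  intro matrix h_ _dom _pre
  unfold Spec_alg4 alg4 alg4_alt
  rw [pvRun_eq matrix h_]
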